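-- pv_equiv track=rewrite | github.com/jcolinpatrick/kryptos | scripts/e_team_artifact_cross.py | diagonal_perm
-- ===== SOURCE A (Python) =====
-- def diagonal_perm(rows, cols, length=97, direction="tl_br"):
--     diags = {}
--     for r in range(rows):
--         for c in range(cols):
--             pos = r * cols + c
--             if pos >= length:
--                 continue
--             key = (r + c) if direction == "tl_br" else (r + (cols - 1 - c))
--             diags.setdefault(key, []).append(pos)
--     return [p for k in sorted(diags) for p in diags[k]]
-- ===== SOURCE B (Python) =====
-- def diagonal_perm(rows, cols, length=97, direction="tl_br"):
--     if rows <= 0 or cols <= 0: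
--         return []
--     out = []
--     for k in range(rows + cols - 1):
--         for r in range(max(0, k - cols + 1), min(rows, k + 1)):
--             c = (k - r) if direction == "tl_br" else (cols - 1 - (k - r))
--             pos = r * cols + c
--             if pos < length:
--                 out.append(pos)
--     return out
-- ===== Notes on version B (the rewrite author's own statement) =====
-- stated objective: simpler
-- what changed: B drops A's dict-of-lists grouping and key sort: it walks the diagonal keys k = 0..rows+cols-2 in increasing order and, for each k, visits exactly the rows that meet that diagonal, computing each column directly and emitting positions in final order in one pass with no intermediate structure.
import Mathlib
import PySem

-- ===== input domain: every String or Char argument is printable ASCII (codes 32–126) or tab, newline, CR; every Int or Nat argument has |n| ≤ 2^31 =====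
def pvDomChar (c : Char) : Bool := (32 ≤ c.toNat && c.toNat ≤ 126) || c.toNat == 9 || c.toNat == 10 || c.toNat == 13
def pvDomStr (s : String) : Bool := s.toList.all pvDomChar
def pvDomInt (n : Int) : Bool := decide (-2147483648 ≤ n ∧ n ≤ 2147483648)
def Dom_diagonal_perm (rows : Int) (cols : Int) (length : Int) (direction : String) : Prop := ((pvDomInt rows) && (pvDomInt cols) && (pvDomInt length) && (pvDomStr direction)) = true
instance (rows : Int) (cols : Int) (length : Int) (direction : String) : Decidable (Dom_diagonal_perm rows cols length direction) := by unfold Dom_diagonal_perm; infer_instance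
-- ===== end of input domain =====

-- B replaces A's dict-of-diagonals-then-sort-keys by a direct double loop that walks the
-- diagonal keys in increasing order and emits each position immediately (objective: simpler).

-- ===== PORT A =====
def diagonal_perm (rows : Int) (cols : Int) (length : Int) (direction : String) : List Int :=
  let diags : PySem.Dict Int (List Int) :=
    (PySem.List.pyRange 0 rows 1).foldl (fun d r =>
      (PySem.List.pyRange 0 cols 1).foldl (fun d c =>
        if length ≤ r * cols + c then d
        else d.modify (if direction == "tl_br" then r + c else r + (cols - 1 - c)) []
          (· ++ [r * cols + c])) d) PySem.Dict.empty
  (PySem.List.sorted diags.keys (fun k => k) false).foldl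
    (fun acc k => acc ++ diags.getD k []) []

-- ===== PORT B =====
def diagonal_perm_alt (rows : Int) (cols : Int) (length : Int) (direction : String) : List Int :=
  if rows ≤ 0 ∨ cols ≤ 0 then [] else
  (PySem.List.pyRange 0 (rows + cols - 1) 1).foldl (fun out k =>
    (PySem.List.pyRange (max 0 (k - cols + 1)) (min rows (k + 1)) 1).foldl (fun out r =>
      let c := if direction == "tl_br" then k - r else cols - 1 - (k - r)
      let pos := r * cols + c
      if pos < length then out ++ [pos] else out) out) []

-- ===== PRECONDITION & SPEC =====
def Spec_diagonal_perm (rows : Int) (cols : Int) (length : Int) (direction : String) (out : List Int) : Prop := out = diagonal_perm_alt rows cols length direction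
instance (rows : Int) (cols : Int) (length : Int) (direction : String) (out : List Int) : Decidable (Spec_diagonal_perm rows cols length direction out) := by unfold Spec_diagonal_perm; infer_instance

-- ===== CLAIM (what is proved, stated in full; the proofs are below) =====
def Claim_equal_diagonal_perm : Prop := ∀ (rows : Int) (cols : Int) (length : Int) (direction : String), Dom_diagonal_perm rows cols length direction → Spec_diagonal_perm rows cols length direction (diagonal_perm rows cols length direction)

-- ===== LEMMAS AND PROOFS =====

-- key of the diagonal through (r, c), and the column B visits on diagonal k at row r
def pvKey (db : Bool) (cols r c : Int) : Int := if db then r + c else r + (cols - 1 - c)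
def pvC (db : Bool) (cols k r : Int) : Int := if db then k - r else cols - 1 - (k - r)

-- the stream of (key, position) pairs A feeds into its dict, in loop order
def pvPairs (rows cols length : Int) (db : Bool) : List (Int × Int) :=
  (PySem.List.pyRange 0 rows 1).flatMap (fun r =>
    ((PySem.List.pyRange 0 cols 1).filter (fun c => decide (r * cols + c < length))).map
      (fun c => (pvKey db cols r c, r * cols + c)))

def pvGrp (rows cols length : Int) (db : Bool) (k : Int) : List Int :=
  ((pvPairs rows cols length db).filter (fun p => p.1 == k)).map (·.2)


theorem pvFlatMap_filter {α β : Type} (p : α → Bool) (g : α → List β) (L : List α)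
    (h : ∀ x ∈ L, p x = false → g x = []) : (L.filter p).flatMap g = L.flatMap g := by
  induction L with
  | nil => rfl
  | cons a L ih =>
    by_cases hp : p a
    · simp [hp, ih (fun x hx => h x (List.mem_cons_of_mem a hx))]
    · simp only [Bool.not_eq_true] at hp
      simp [hp, h a (List.mem_cons_self) hp,
        ih (fun x hx => h x (List.mem_cons_of_mem a hx))]

-- singleton filter over a range
theorem pvSingleton (a b c₀ : Int) (q : Int → Bool) (f : Int → Int) :
    ((PySem.List.pyRange a b 1).filter (fun c => (c == c₀) && q c)).map f
      = if a ≤ c₀ ∧ c₀ < b ∧ q c₀ = true then [f c₀] else [] := by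
  rw [← List.filter_filter, List.filter_beq]
  by_cases hq : q c₀ = true
  · rw [List.count_filter hq]
    by_cases hm : c₀ ∈ PySem.List.pyRange a b 1
    · rw [List.count_eq_one_of_mem (PySem.List.nodup_pyRange_one a b) hm]
      rw [PySem.List.mem_pyRange_one] at hm
      simp [hq, hm.1, hm.2]
    · rw [List.count_eq_zero_of_not_mem hm]
      rw [PySem.List.mem_pyRange_one] at hm
      have : ¬ (a ≤ c₀ ∧ c₀ < b ∧ q c₀ = true) := by tauto
      simp [this]
  · have hm : c₀ ∉ List.filter q (PySem.List.pyRange a b 1) := by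
      simp [List.mem_filter, hq]
    rw [List.count_eq_zero_of_not_mem hm]
    have : ¬ (a ≤ c₀ ∧ c₀ < b ∧ q c₀ = true) := by tauto
    simp [this]

theorem pvCore (cols length k r : Int) (db : Bool) :
    ((PySem.List.pyRange 0 cols 1).filter
        (fun c => (pvKey db cols r c == k) && decide (r * cols + c < length))).map (fun c => r * cols + c)
      = if 0 ≤ pvC db cols k r ∧ pvC db cols k r < cols ∧ r * cols + pvC db cols k r < length
        then [r * cols + pvC db cols k r] else [] := by
  have hpred : ∀ c : Int, (pvKey db cols r c == k) = (c == pvC db cols k r) := by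
    intro c
    have h : pvKey db cols r c = k ↔ c = pvC db cols k r := by
      cases db <;> simp [pvKey, pvC] <;> omega
    rw [Bool.eq_iff_iff, beq_iff_eq, beq_iff_eq]
    exact h
  have := pvSingleton 0 cols (pvC db cols k r) (fun c => decide (r * cols + c < length)) (fun c => r * cols + c)
  rw [show (fun c => (pvKey db cols r c == k) && decide (r * cols + c < length))
        = (fun c => (c == pvC db cols k r) && decide (r * cols + c < length)) from funext fun c => by rw [hpred]]
  rw [this]
  by_cases h : 0 ≤ pvC db cols k r ∧ pvC db cols k r < cols ∧ r * cols + pvC db cols k r < length <;>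
    simp [h]

theorem pvKey_bound (rows cols length : Int) (db : Bool) (p : Int × Int)
    (hp : p ∈ pvPairs rows cols length db) : 0 ≤ p.1 ∧ p.1 < rows + cols - 1 := by
  rw [pvPairs] at hp
  simp only [List.mem_flatMap, List.mem_map, List.mem_filter] at hp
  obtain ⟨r, hr, c, ⟨hc, -⟩, rfl⟩ := hp
  rw [PySem.List.mem_pyRange_one] at hr hc
  cases db <;> simp only [pvKey] <;> simp <;> omega

-- B = flatMap over diagonals of per-diagonal singleton lists
theorem B_eq (rows cols length : Int) (db : Bool) (direction : String)
    (hdb : (direction == "tl_br") = db) :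
    (PySem.List.pyRange 0 (rows + cols - 1) 1).foldl (fun out k =>
      (PySem.List.pyRange (max 0 (k - cols + 1)) (min rows (k + 1)) 1).foldl (fun out r =>
        let c := if direction == "tl_br" then k - r else cols - 1 - (k - r)
        let pos := r * cols + c
        if pos < length then out ++ [pos] else out) out) ([] : List Int)
    = (PySem.List.pyRange 0 (rows + cols - 1) 1).flatMap (fun k =>
        (PySem.List.pyRange (max 0 (k - cols + 1)) (min rows (k + 1)) 1).flatMap (fun r =>
          if r * cols + pvC db cols k r < length then [r * cols + pvC db cols k r] else [])) := by
  subst hdb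
  have hinner : ∀ (k : Int) (out : List Int),
      (PySem.List.pyRange (max 0 (k - cols + 1)) (min rows (k + 1)) 1).foldl (fun out r =>
        let c := if direction == "tl_br" then k - r else cols - 1 - (k - r)
        let pos := r * cols + c
        if pos < length then out ++ [pos] else out) out
      = out ++ (PySem.List.pyRange (max 0 (k - cols + 1)) (min rows (k + 1)) 1).flatMap (fun r =>
          if r * cols + pvC (direction == "tl_br") cols k r < length
          then [r * cols + pvC (direction == "tl_br") cols k r] else []) := by
    intro k out
    induction (PySem.List.pyRange (max 0 (k - cols + 1)) (min rows (k + 1)) 1) generalizing out with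
    | nil => simp
    | cons r t ih =>
      simp only [List.foldl_cons, List.flatMap_cons]
      rw [ih]
      by_cases h : r * cols + pvC (direction == "tl_br") cols k r < length
      · rw [if_pos h, if_pos]
        · simp [pvC]
        · simpa [pvC] using h
      · rw [if_neg h, if_neg]
        · simp
        · simpa [pvC] using h
  calc (PySem.List.pyRange 0 (rows + cols - 1) 1).foldl _ ([] : List Int)
      = (PySem.List.pyRange 0 (rows + cols - 1) 1).foldl (fun out k => out ++
          (PySem.List.pyRange (max 0 (k - cols + 1)) (min rows (k + 1)) 1).flatMap (fun r =>
            if r * cols + pvC (direction == "tl_br") cols k r < length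
            then [r * cols + pvC (direction == "tl_br") cols k r] else [])) [] := by
        apply PySem.List.foldl_congr_mem
        intro out k _
        exact hinner k out
    _ = _ := by
        rw [PySem.List.foldl_append_eq_flatMap]
        simp

-- on each diagonal k the wide row loop over [0, rows) visits the same cells as the
-- narrow loop over [max 0 (k-cols+1), min rows (k+1))
theorem pvNarrow (rows cols length k : Int) (db : Bool) (hr : 1 ≤ rows) (hc : 1 ≤ cols)
    (hk : 0 ≤ k) (hk2 : k < rows + cols - 1) :
    (PySem.List.pyRange 0 rows 1).flatMap (fun r =>
      if 0 ≤ pvC db cols k r ∧ pvC db cols k r < cols ∧ r * cols + pvC db cols k r < length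
      then [r * cols + pvC db cols k r] else [])
    = (PySem.List.pyRange (max 0 (k - cols + 1)) (min rows (k + 1)) 1).flatMap (fun r =>
        if r * cols + pvC db cols k r < length then [r * cols + pvC db cols k r] else []) := by
  have hcw : ∀ r : Int, 0 ≤ r → r < rows → ((0 ≤ pvC db cols k r ∧ pvC db cols k r < cols) ↔
      (max 0 (k - cols + 1) ≤ r ∧ r < min rows (k + 1))) := by
    intro r h0 h1
    cases db <;> simp only [pvC, if_true, if_false, Bool.false_eq_true] <;> simp <;> omega
  rw [PySem.List.pyRange_one_append 0 (max 0 (k - cols + 1)) rows (by omega) (by omega),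
    PySem.List.pyRange_one_append (max 0 (k - cols + 1)) (min rows (k + 1)) rows (by omega) (by omega),
    List.flatMap_append, List.flatMap_append]
  have hleft : (PySem.List.pyRange 0 (max 0 (k - cols + 1)) 1).flatMap (fun r =>
      if 0 ≤ pvC db cols k r ∧ pvC db cols k r < cols ∧ r * cols + pvC db cols k r < length
      then [r * cols + pvC db cols k r] else []) = [] := by
    rw [List.flatMap_eq_nil_iff]
    intro r hr'
    rw [PySem.List.mem_pyRange_one] at hr'
    rw [if_neg]
    intro ⟨h1, h2, _⟩
    have := (hcw r (by omega) (by omega)).mp ⟨h1, h2⟩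
    omega
  have hright : (PySem.List.pyRange (min rows (k + 1)) rows 1).flatMap (fun r =>
      if 0 ≤ pvC db cols k r ∧ pvC db cols k r < cols ∧ r * cols + pvC db cols k r < length
      then [r * cols + pvC db cols k r] else []) = [] := by
    rw [List.flatMap_eq_nil_iff]
    intro r hr'
    rw [PySem.List.mem_pyRange_one] at hr'
    rw [if_neg]
    intro ⟨h1, h2, _⟩
    have := (hcw r (by omega) (by omega)).mp ⟨h1, h2⟩
    omega
  rw [hleft, hright, List.nil_append, List.append_nil]
  apply List.flatMap_congr
  intro r hr'
  rw [PySem.List.mem_pyRange_one] at hr'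
  have hin : 0 ≤ pvC db cols k r ∧ pvC db cols k r < cols := by
    cases db <;> simp only [pvC, if_true, if_false, Bool.false_eq_true] <;> simp <;> omega
  by_cases h : r * cols + pvC db cols k r < length
  · rw [if_pos h, if_pos ⟨hin.1, hin.2, h⟩]
  · rw [if_neg h, if_neg (by tauto)]

-- A's nested loops build the modify-fold over pvPairs
theorem dictA_eq (rows cols length : Int) (direction : String) :
    (PySem.List.pyRange 0 rows 1).foldl (fun d r =>
      (PySem.List.pyRange 0 cols 1).foldl (fun d c =>
        if length ≤ r * cols + c then d
        else d.modify (if direction == "tl_br" then r + c else r + (cols - 1 - c)) []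
          (· ++ [r * cols + c])) d)
      (PySem.Dict.empty : PySem.Dict Int (List Int))
    = (pvPairs rows cols length (direction == "tl_br")).foldl
        (fun d p => d.modify p.1 [] (· ++ [p.2])) PySem.Dict.empty := by
  rw [pvPairs, List.foldl_flatMap]
  apply PySem.List.foldl_congr_mem
  intro d r _
  rw [List.foldl_map, ← PySem.List.foldl_ite_eq_foldl_filter (p := fun c => r * cols + c < length)]
  apply PySem.List.foldl_congr_mem
  intro d c _
  simp only [pvKey]
  split_ifs with h1 h2 <;> first | rfl | omega

theorem pvGrp_eq (rows cols length k : Int) (db : Bool) :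
    pvGrp rows cols length db k
    = (PySem.List.pyRange 0 rows 1).flatMap (fun r =>
        if 0 ≤ pvC db cols k r ∧ pvC db cols k r < cols ∧ r * cols + pvC db cols k r < length
        then [r * cols + pvC db cols k r] else []) := by
  rw [pvGrp, pvPairs, List.filter_flatMap, List.map_flatMap]
  apply List.flatMap_congr
  intro r _
  rw [List.filter_map, List.map_map, List.filter_filter]
  have : ((fun p : Int × Int => p.1 == k) ∘ fun c => (pvKey db cols r c, r * cols + c))
      = fun c => pvKey db cols r c == k := rfl
  rw [this]
  have : ((fun p : Int × Int => p.2) ∘ fun c => (pvKey db cols r c, r * cols + c))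
      = fun c => r * cols + c := rfl
  rw [this]
  exact pvCore cols length k r db

theorem A_assemble (rows cols length : Int) (db : Bool) (diags : PySem.Dict Int (List Int))
    (hd : diags = (pvPairs rows cols length db).foldl
        (fun d p => d.modify p.1 [] (· ++ [p.2])) (PySem.Dict.empty : PySem.Dict Int (List Int))) :
    (PySem.List.sorted diags.keys (fun k => k) false).foldl
       (fun acc k => acc ++ diags.getD k []) []
    = (PySem.List.pyRange 0 (rows + cols - 1) 1).flatMap (pvGrp rows cols length db) := by
  have hget : ∀ k, diags.getD k [] = pvGrp rows cols length db k := by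
    intro k
    rw [hd, PySem.Dict.getD_foldl_modify_append, PySem.Dict.getD_empty]
    rfl
  have hmemkeys : ∀ k, k ∈ diags.keys ↔ k ∈ (pvPairs rows cols length db).map Prod.fst := by
    intro k
    rw [hd, PySem.Dict.keys_foldl_modify_key, PySem.Dict.keys_empty, PySem.Set.mem_update]
    simp
  have hnodup : diags.keys.Nodup := by
    rw [hd]
    exact PySem.Dict.nodup_keys_foldl_modify_key _ _ _ _ _ PySem.Dict.nodup_keys_empty
  have hsorted : PySem.List.sorted diags.keys (fun k => k) false
      = (PySem.List.pyRange 0 (rows + cols - 1) 1).filter (fun k => decide (k ∈ diags.keys)) := by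
    apply PySem.List.sorted_eq_of_perm_of_pairwise_lt
    · rw [List.perm_ext_iff_of_nodup (List.Nodup.filter _ (PySem.List.nodup_pyRange_one _ _)) hnodup]
      intro k
      rw [List.mem_filter]
      constructor
      · rintro ⟨-, hk⟩; simpa using hk
      · intro hk
        refine ⟨?_, by simpa using hk⟩
        rw [hmemkeys] at hk
        obtain ⟨p, hp, rfl⟩ := List.mem_map.mp hk
        have := pvKey_bound rows cols length db p hp
        rw [PySem.List.mem_pyRange_one]
        omega
    · exact List.Pairwise.filter _ (PySem.List.pairwise_lt_pyRange_one _ _)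
  rw [hsorted, PySem.List.foldl_append_eq_flatMap, List.nil_append]
  have : ∀ k ∈ (PySem.List.pyRange 0 (rows + cols - 1) 1).filter (fun k => decide (k ∈ diags.keys)),
      diags.getD k [] = pvGrp rows cols length db k := fun k _ => hget k
  rw [List.flatMap_congr this]
  apply pvFlatMap_filter
  intro k _ hk
  simp only [decide_eq_false_iff_not] at hk
  rw [hmemkeys] at hk
  rw [pvGrp, List.filter_eq_nil_iff.mpr, List.map_nil]
  intro p hp
  simp only [beq_iff_eq]
  intro h
  exact hk (List.mem_map.mpr ⟨p, hp, h⟩)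

theorem pvPairs_nil (rows cols length : Int) (db : Bool) (h : rows ≤ 0 ∨ cols ≤ 0) :
    pvPairs rows cols length db = [] := by
  rcases h with h | h <;>
    simp [pvPairs, PySem.List.pyRange_one, Int.toNat_of_nonpos (by omega : (_ : Int) ≤ 0)]

theorem diagonal_perm_spec : Claim_equal_diagonal_perm := by
  intro rows cols length direction _
  unfold Spec_diagonal_perm diagonal_perm diagonal_perm_alt
  rw [dictA_eq rows cols length direction]
  rw [A_assemble rows cols length (direction == "tl_br") _ rfl]
  by_cases h : rows ≤ 0 ∨ cols ≤ 0
  · rw [if_pos h]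
    simp [pvGrp, pvPairs_nil rows cols length _ h]
  · rw [if_neg h]
    rw [B_eq rows cols length (direction == "tl_br") direction rfl]
    apply List.flatMap_congr
    intro k hk
    rw [PySem.List.mem_pyRange_one] at hk
    rw [pvGrp_eq rows cols length k (direction == "tl_br")]
    exact pvNarrow rows cols length k (direction == "tl_br") (by omega) (by omega) hk.1 hk.2
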